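-- pv_equiv track=rewrite | github.com/Ocean82/BurntBeatsV3 | server/enhanced-midi-generator.py | generate_chord_progression
-- ===== SOURCE A (Python) =====
-- def generate_chord_progression(genre, key="C", num_bars=8):
--     """Generate genre-appropriate chord progressions"""
--     progressions = {
--         "pop": ["C", "Am", "F", "G"],
--         "rock": ["C", "F", "G", "C"],
--         "jazz": ["Cmaj7", "Am7", "Dm7", "G7"],
--         "blues": ["C7", "F7", "C7", "G7"],
--         "electronic": ["Cm", "Ab", "Eb", "Bb"],
--         "classical": ["C", "F", "G", "Am"],
--         "country": ["C", "F", "G", "C"],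
--         "hip-hop": ["Cm", "Fm", "Gm", "Cm"]
--     }
--
--     base_progression = progressions.get(genre.lower(), progressions["pop"])
--
--     # Extend progression to fill bars
--     full_progression = []
--     for i in range(num_bars):
--         full_progression.append(base_progression[i % len(base_progression)])
--
--     return full_progression
-- ===== SOURCE B (Python) =====
-- def generate_chord_progression(genre, key="C", num_bars=8):
--     """Generate genre-appropriate chord progressions"""
--     progressions = {
--         "pop": ["C", "Am", "F", "G"],
--         "rock": ["C", "F", "G", "C"],
--         "jazz": ["Cmaj7", "Am7", "Dm7", "G7"],
--         "blues": ["C7", "F7", "C7", "G7"],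
--         "electronic": ["Cm", "Ab", "Eb", "Bb"],
--         "classical": ["C", "F", "G", "Am"],
--         "country": ["C", "F", "G", "C"],
--         "hip-hop": ["Cm", "Fm", "Gm", "Cm"]
--     }
--     base = progressions.get(genre.lower(), progressions["pop"])
--     n = max(0, num_bars)
--     reps = n // len(base) + 1
--     return (base * reps)[:n]
-- ===== Notes on version B (the rewrite author's own statement) =====
-- stated objective: idiomatic
-- what changed: Replaces the per-bar indexing loop (append base[i % len] for each i in range(num_bars)) with whole-list repetition and a slice: build base * (n // len(base) + 1) once and truncate to n bars.
import Mathlib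
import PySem

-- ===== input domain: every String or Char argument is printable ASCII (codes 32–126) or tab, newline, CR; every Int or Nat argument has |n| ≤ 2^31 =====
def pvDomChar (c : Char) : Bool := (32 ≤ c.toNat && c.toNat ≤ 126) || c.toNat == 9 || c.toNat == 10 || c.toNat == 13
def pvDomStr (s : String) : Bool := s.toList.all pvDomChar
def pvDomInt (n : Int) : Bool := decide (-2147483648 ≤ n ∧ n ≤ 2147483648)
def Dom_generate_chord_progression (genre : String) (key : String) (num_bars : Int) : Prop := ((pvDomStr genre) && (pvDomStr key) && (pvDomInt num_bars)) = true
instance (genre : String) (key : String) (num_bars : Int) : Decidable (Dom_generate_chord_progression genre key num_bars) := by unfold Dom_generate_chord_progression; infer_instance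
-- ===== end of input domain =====

-- B tiles the progression by list repetition + slice instead of A's per-bar indexing loop (objective: idiomatic).

-- ===== PORT A =====
-- the genre→progression table both Pythons build literally
def chordProgressions : PySem.Dict String (List String) :=
  PySem.Dict.ofList [
    ("pop", ["C", "Am", "F", "G"]),
    ("rock", ["C", "F", "G", "C"]),
    ("jazz", ["Cmaj7", "Am7", "Dm7", "G7"]),
    ("blues", ["C7", "F7", "C7", "G7"]),
    ("electronic", ["Cm", "Ab", "Eb", "Bb"]),
    ("classical", ["C", "F", "G", "Am"]),
    ("country", ["C", "F", "G", "C"]),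
    ("hip-hop", ["Cm", "Fm", "Gm", "Cm"])]

def generate_chord_progression (genre : String) (key : String) (num_bars : Int) : List String :=
  let base_progression :=
    chordProgressions.getD (PySem.Str.lower genre) (chordProgressions.getD "pop" [])
  (PySem.List.pyRange 0 num_bars 1).foldl
    (fun full_progression i =>
      full_progression ++
        [PySem.List.pyGetD base_progression
          (PySem.Int.mod i (base_progression.length : Int)) ""])
    []

-- ===== PORT B =====
def generate_chord_progression_alt (genre : String) (key : String) (num_bars : Int) : List String :=
  let base :=
    chordProgressions.getD (PySem.Str.lower genre) (chordProgressions.getD "pop" [])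
  let n := max 0 num_bars
  let reps := PySem.Int.floordiv n (base.length : Int) + 1
  PySem.List.slice (List.replicate reps.toNat base).flatten none (some n)

-- ===== PRECONDITION & SPEC =====
def Spec_generate_chord_progression (genre : String) (key : String) (num_bars : Int) (out : List String) : Prop := out = generate_chord_progression_alt genre key num_bars
instance (genre : String) (key : String) (num_bars : Int) (out : List String) : Decidable (Spec_generate_chord_progression genre key num_bars out) := by unfold Spec_generate_chord_progression; infer_instance

-- ===== CLAIM (what is proved, stated in full; the proofs are below) =====
def Claim_equal_generate_chord_progression : Prop := ∀ (genre : String) (key : String) (num_bars : Int), Dom_generate_chord_progression genre key num_bars → Spec_generate_chord_progression genre key num_bars (generate_chord_progression genre key num_bars)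

-- ===== LEMMAS AND PROOFS =====

lemma flatten_replicate_getElem? {α : Type} (base : List α) (r k : Nat)
    (hk : k < base.length * r) :
    (List.replicate r base).flatten[k]? = base[k % base.length]? := by
  induction r generalizing k with
  | zero => simp at hk
  | succ r ih =>
    rw [Nat.mul_succ] at hk
    rw [List.replicate_succ, List.flatten_cons]
    by_cases h : k < base.length
    · rw [List.getElem?_append_left h, Nat.mod_eq_of_lt h]
    · have h' : base.length ≤ k := Nat.le_of_not_lt h
      rw [List.getElem?_append_right h', ih (k - base.length) (by omega),
        Nat.mod_eq_sub_mod h']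

lemma tile_eq (base : List String) (hm : 0 < base.length) (nb : Int) :
    (PySem.List.pyRange 0 nb 1).map
      (fun i => PySem.List.pyGetD base (PySem.Int.mod i (base.length : Int)) "")
    = ((List.replicate (PySem.Int.floordiv (max 0 nb) (base.length : Int) + 1).toNat base).flatten).take (max 0 nb).toNat := by
  rcases le_or_gt nb 0 with h | h
  · rw [PySem.List.pyRange_one_eq_nil h]
    have : max 0 nb = 0 := by omega
    simp [this]
  · have hmax : max 0 nb = nb := by omega
    rw [hmax, PySem.List.pyRange_one]
    set n := (nb - 0).toNat with hn
    have hfd : PySem.Int.floordiv nb (base.length : Int) = ((n / base.length : Nat) : Int) := by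
      have : nb = (n : Int) := by omega
      rw [this]; exact_mod_cast PySem.Int.floordiv_natCast n base.length
    have hnb : nb.toNat = n := by omega
    have hr : ∀ q : Nat, (((q : Nat) : Int) + 1).toNat = q + 1 := by intro q; omega
    rw [hfd, hnb, hr]
    apply List.ext_getElem?
    intro k
    rw [List.getElem?_take]
    by_cases hk : k < n
    · rw [if_pos hk,
        flatten_replicate_getElem? base _ k (lt_trans hk (Nat.lt_mul_div_succ n hm)),
        List.getElem?_map, List.getElem?_map, List.getElem?_range hk]
      have hmod : PySem.Int.mod (0 + (k:Int)) (base.length : Int) = ((k % base.length : Nat) : Int) := by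
        rw [zero_add]; exact_mod_cast PySem.Int.mod_natCast k base.length
      simp only [Option.map_some, hmod, PySem.List.pyGetD_natCast]
      rw [List.getD_eq_getElem?_getD, List.getElem?_eq_getElem (Nat.mod_lt k hm)]
      rfl
    · rw [if_neg hk, List.getElem?_eq_none (by simp; omega)]

-- every progression in the table (and the "pop" default) has positive length
lemma base_length_pos (g : String) :
    0 < (chordProgressions.getD g (chordProgressions.getD "pop" [])).length := by
  rw [PySem.Dict.getD_eq_get?_getD]
  cases h : chordProgressions.get? g with
  | none => decide
  | some v =>
    have e : chordProgressions = PySem.Dict.mk [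
        ("pop", ["C", "Am", "F", "G"]),
        ("rock", ["C", "F", "G", "C"]),
        ("jazz", ["Cmaj7", "Am7", "Dm7", "G7"]),
        ("blues", ["C7", "F7", "C7", "G7"]),
        ("electronic", ["Cm", "Ab", "Eb", "Bb"]),
        ("classical", ["C", "F", "G", "Am"]),
        ("country", ["C", "F", "G", "C"]),
        ("hip-hop", ["Cm", "Fm", "Gm", "Cm"])] := by decide
    rw [e] at h
    repeat rw [PySem.Dict.get?_mk_cons] at h
    split_ifs at h <;> first | (rw [← h]; decide) | simp [pysem] at h

-- ===== VERDICT (by name: the statement is the Claim_ definition above) =====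
theorem generate_chord_progression_spec : Claim_equal_generate_chord_progression := by
  intro genre key num_bars _
  unfold Spec_generate_chord_progression generate_chord_progression generate_chord_progression_alt
  simp only []
  rw [PySem.List.foldl_append_singleton_eq_map, List.nil_append,
    tile_eq _ (base_length_pos _), PySem.List.slice_to _ (le_max_left 0 num_bars)]
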